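-- pv_equiv track=rewrite | github.com/jean50621/Badminton_Challenge | 09_PlayerLocation/inference.py | find_prvs
-- ===== SOURCE A (Python) =====
-- def find_prvs(infos: dict, i: int, max_retrive: int = None):
--     if max_retrive is None:
--         final = -1
--     else:
--         final = max_retrive
--     for j in range(i-1, final, -1):
--         if j in infos:
--             return j
--     return None
-- ===== SOURCE B (Python) =====
-- def find_prvs(infos: dict, i: int, max_retrive: int = None):
--     final = -1 if max_retrive is None else max_retrive
--     cands = [k for k in infos if final < k < i]
--     return max(cands) if cands else None
-- ===== Notes on version B (the rewrite author's own statement) =====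
-- stated objective: simpler
-- what changed: Replaces the backward integer scan over range(i-1, final, -1) with an early return by a filter over the dict's actual keys followed by max(), so the work depends on the number of keys instead of the size of the integer gap.
import Mathlib
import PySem

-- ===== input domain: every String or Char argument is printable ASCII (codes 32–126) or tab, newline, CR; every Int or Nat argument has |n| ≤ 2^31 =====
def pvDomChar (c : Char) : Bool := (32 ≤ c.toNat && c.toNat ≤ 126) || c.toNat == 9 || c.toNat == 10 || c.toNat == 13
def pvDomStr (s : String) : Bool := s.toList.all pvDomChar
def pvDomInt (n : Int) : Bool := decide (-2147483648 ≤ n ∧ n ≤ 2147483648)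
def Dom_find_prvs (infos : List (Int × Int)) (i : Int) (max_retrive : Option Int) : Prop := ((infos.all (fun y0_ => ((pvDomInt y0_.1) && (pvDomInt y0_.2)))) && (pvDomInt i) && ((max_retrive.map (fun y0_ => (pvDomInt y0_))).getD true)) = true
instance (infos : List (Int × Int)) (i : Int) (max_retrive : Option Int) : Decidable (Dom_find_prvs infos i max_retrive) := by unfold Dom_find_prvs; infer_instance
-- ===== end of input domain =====

-- B replaces A's backward integer scan over range(i-1, final, -1) by a filter of the
-- dict's keys to the open interval (final, i) followed by max(); objective: simpler.
-- ===== PORT A =====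
-- for j in range(i-1, final, -1): if j in infos: return j  --  return None
def find_prvs (infos : List (Int × Int)) (i : Int) (max_retrive : Option Int) : Option Int :=
  let final : Int := match max_retrive with | none => -1 | some m => m
  (PySem.List.pyRange (i - 1) final (-1)).find? (fun j => (infos.map Prod.fst).contains j)

-- ===== PORT B =====
-- cands = [k for k in infos if final < k < i]; return max(cands) if cands else None
def find_prvs_alt (infos : List (Int × Int)) (i : Int) (max_retrive : Option Int) : Option Int :=
  let final : Int := match max_retrive with | none => -1 | some m => m
  let cands := (infos.map Prod.fst).filter (fun k => decide (final < k) && decide (k < i))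
  match cands with
  | [] => none
  | _ => PySem.List.max? cands (fun k => k)

-- ===== PRECONDITION & SPEC =====
def Spec_find_prvs (infos : List (Int × Int)) (i : Int) (max_retrive : Option Int) (out : Option Int) : Prop := out = find_prvs_alt infos i max_retrive
instance (infos : List (Int × Int)) (i : Int) (max_retrive : Option Int) (out : Option Int) : Decidable (Spec_find_prvs infos i max_retrive out) := by unfold Spec_find_prvs; infer_instance

-- ===== CLAIM (what is proved, stated in full; the proofs are below) =====
def Claim_equal_find_prvs : Prop := ∀ (infos : List (Int × Int)) (i : Int) (max_retrive : Option Int), Dom_find_prvs infos i max_retrive → Spec_find_prvs infos i max_retrive (find_prvs infos i max_retrive)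

-- ===== LEMMAS AND PROOFS =====

-- ===== VERDICT (by name: the statement is the Claim_ definition above) =====
-- Core: the early-return countdown scan find? equals max? of the keys in (final, a].
lemma scan_eq_max (keys : List Int) (final : Int) :
    ∀ (n : Nat) (a : Int), (a - final).toNat = n →
      (PySem.List.pyRange a final (-1)).find? (fun j => keys.contains j)
        = PySem.List.max? (keys.filter (fun k => decide (final < k) && decide (k ≤ a))) (fun k => k) := by
  intro n
  induction n with
  | zero =>
      intro a ha
      have hle : a ≤ final := by omega
      rw [PySem.List.pyRange_neg_one_eq_nil hle]
      have : keys.filter (fun k => decide (final < k) && decide (k ≤ a)) = [] := by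
        apply List.filter_eq_nil_iff.mpr
        intro k _
        simp
        omega
      simp [this, PySem.List.max?]
  | succ m ih =>
      intro a ha
      have hlt : final < a := by omega
      rw [PySem.List.pyRange_neg_one_cons hlt]
      cases hc : keys.contains a with
      | true =>
        rw [List.find?_cons_of_pos hc]
        -- a is a key and the largest candidate, so max? of the filtered list is a
        have hmem : a ∈ keys.filter (fun k => decide (final < k) && decide (k ≤ a)) := by
          rw [List.mem_filter]
          refine ⟨List.contains_iff_mem.mp hc, by simp; omega⟩
        rcases hmax : PySem.List.max? (keys.filter (fun k => decide (final < k) && decide (k ≤ a))) (fun k => k) with _ | m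
        · exfalso
          have := (PySem.List.max?_eq_none_iff _ _).mp hmax
          rw [this] at hmem
          exact absurd hmem (List.not_mem_nil)
        · have h1 : a ≤ m := PySem.List.max?_isMax hmax a hmem
          have h2 : m ≤ a := by
            have hm := PySem.List.max?_mem hmax
            rw [List.mem_filter] at hm
            have := hm.2
            simp at this
            omega
          have : m = a := le_antisymm h2 h1
          rw [this]
      | false =>
        rw [List.find?_cons_of_neg (by simpa using hc)]
        have hstep : keys.filter (fun k => decide (final < k) && decide (k ≤ a))
            = keys.filter (fun k => decide (final < k) && decide (k ≤ a - 1)) := by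
          apply List.filter_congr
          intro k hk
          have hne : k ≠ a := by
            intro h
            have := List.contains_iff_mem.mpr (h ▸ hk)
            rw [hc] at this
            exact Bool.false_ne_true this
          have hd : decide (k ≤ a) = decide (k ≤ a - 1) := decide_eq_decide.mpr (by omega)
          simp [hd]
        rw [hstep]
        exact ih (a - 1) (by omega)

lemma scan_eq_filter_max (keys : List Int) (i final : Int) :
    (PySem.List.pyRange (i - 1) final (-1)).find? (fun j => keys.contains j)
      = match keys.filter (fun k => decide (final < k) && decide (k < i)) with
        | [] => none
        | _ => PySem.List.max? (keys.filter (fun k => decide (final < k) && decide (k < i))) (fun k => k) := by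
  have hpred : keys.filter (fun k => decide (final < k) && decide (k < i))
      = keys.filter (fun k => decide (final < k) && decide (k ≤ i - 1)) := by
    apply List.filter_congr
    intro k _
    have hd : decide (k < i) = decide (k ≤ i - 1) := decide_eq_decide.mpr (by omega)
    simp [hd]
  rcases hc : keys.filter (fun k => decide (final < k) && decide (k < i)) with _ | ⟨x, t⟩
  · rw [scan_eq_max keys final _ (i - 1) rfl, ← hpred, hc]
    rfl
  · rw [scan_eq_max keys final _ (i - 1) rfl, ← hpred, hc]

theorem find_prvs_spec : Claim_equal_find_prvs := by
  intro infos i max_retrive _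
  unfold Spec_find_prvs find_prvs find_prvs_alt
  cases max_retrive with
  | none => exact scan_eq_filter_max (infos.map Prod.fst) i (-1)
  | some m => exact scan_eq_filter_max (infos.map Prod.fst) i m
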